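-- pv_equiv track=rewrite | github.com/AdamZhouSE/pythonHomework | Code/CodeRecords/2668/60657/257812.py | find
-- ===== SOURCE A (Python) =====
-- def find(a):
--     temp=bin(a)
--     temp=list(temp)
--     for i in range(2,len(temp)):
--         if temp[i]=='0' :
--             temp[i]='1'
--     temp=''.join(temp)
--     return int(temp,2)
-- ===== SOURCE B (Python) =====
-- def find(a):
--     if a == 0:
--         return 1
--     sign = -1 if a < 0 else 1
--     n = abs(a).bit_length()
--     return sign * (2 ** n - 1)
-- ===== Notes on version B (the rewrite author's own statement) =====
-- stated objective: simpler
-- what changed: Replaces the bin()/list/character-flipping loop and re-parse with a closed form: sign * (2**bit_length(|a|) - 1), with a==0 mapping to 1 as A does.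
import Mathlib
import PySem

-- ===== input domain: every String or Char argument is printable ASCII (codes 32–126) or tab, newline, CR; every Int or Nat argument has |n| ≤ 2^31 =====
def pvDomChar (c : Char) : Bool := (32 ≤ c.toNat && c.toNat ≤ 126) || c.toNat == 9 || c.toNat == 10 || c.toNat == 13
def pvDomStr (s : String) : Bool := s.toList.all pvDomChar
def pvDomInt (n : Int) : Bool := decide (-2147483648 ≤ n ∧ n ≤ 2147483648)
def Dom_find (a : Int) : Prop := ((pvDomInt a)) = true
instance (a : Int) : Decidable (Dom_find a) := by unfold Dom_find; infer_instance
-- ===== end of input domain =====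

-- B replaces A's bin()/list/flip-each-'0' loop and re-parse by the closed form sign * (2^bit_length(|a|) - 1) (with 0 ↦ 1, as A).

-- ===== PORT A =====
-- binary digits of a natural number, most significant first (bin(n) for n > 0 yields these after "0b")
def binDigits : Nat → List Char
  | n =>
    if h : n = 0 then []
    else binDigits (n / 2) ++ [if n % 2 = 1 then '1' else '0']
decreasing_by exact Nat.div_lt_self (Nat.pos_of_ne_zero h) (by norm_num)

-- Python's bin(a), as a list of characters (exact on all Int)
def pyBin (a : Int) : List Char :=
  (if a < 0 then ['-'] else []) ++ ['0', 'b'] ++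
    (if a = 0 then ['0'] else binDigits a.natAbs)

-- ''.join plus int(temp, 2): parse an optional '-', the "0b" prefix, then base-2 digits (exact on A's strings)
def foldBits (l : List Char) : Int :=
  l.foldl (fun acc c => acc * 2 + (if c = '1' then 1 else 0)) 0

def parseVal (l : List Char) : Int :=
  match l with
  | '0' :: 'b' :: rest => foldBits rest
  | _ => foldBits l

def intOfBin (l : List Char) : Int :=
  match l with
  | '-' :: rest => - parseVal rest
  | _ => parseVal l

-- A: temp = list(bin(a)); for i in range(2, len(temp)): if temp[i]=='0': temp[i]='1'; return int(''.join(temp), 2)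
def find (a : Int) : Int :=
  let temp := pyBin a
  let temp2 := temp.mapIdx (fun i c => if 2 ≤ i ∧ c = '0' then '1' else c)
  intOfBin temp2

-- ===== PORT B =====
-- abs(a).bit_length()
def bitLen : Nat → Nat
  | n =>
    if h : n = 0 then 0
    else bitLen (n / 2) + 1
decreasing_by exact Nat.div_lt_self (Nat.pos_of_ne_zero h) (by norm_num)

def find_alt (a : Int) : Int :=
  if a = 0 then 1
  else (if a < 0 then -1 else 1) * (2 ^ (bitLen a.natAbs) - 1)

-- ===== PRECONDITION & SPEC =====
def Spec_find (a : Int) (out : Int) : Prop := out = find_alt a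
instance (a : Int) (out : Int) : Decidable (Spec_find a out) := by unfold Spec_find; infer_instance

-- ===== CLAIM (what is proved, stated in full; the proofs are below) =====
def Claim_equal_find : Prop := ∀ (a : Int), Dom_find a → Spec_find a (find a)

-- ===== LEMMAS AND PROOFS =====

theorem mapIdx_eq_map_of_const {α β : Type} (f : Nat → α → β) (g : α → β)
    (h : ∀ i c, f i c = g c) : ∀ l : List α, l.mapIdx f = l.map g := by
  intro l
  induction l generalizing f with
  | nil => simp
  | cons x xs ih =>
    rw [List.mapIdx_cons, h, List.map_cons, ih (fun i => f (i + 1)) (fun i c => h (i + 1) c)]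

theorem flip_binDigits (n : Nat) :
    (binDigits n).map (fun c => if c = '0' then '1' else c) = List.replicate (bitLen n) '1' := by
  induction n using Nat.strong_induction_on with
  | _ n ih =>
    rw [binDigits, bitLen]
    by_cases h : n = 0
    · simp [h]
    · simp only [h, dif_neg, not_false_iff]
      rw [List.map_append, ih (n / 2) (Nat.div_lt_self (Nat.pos_of_ne_zero h) (by norm_num)),
        List.replicate_succ']
      congr 1
      by_cases hb : n % 2 = 1 <;> simp [hb]

theorem foldBits_ones (k : Nat) (acc : Int) :
    (List.replicate k '1').foldl (fun acc c => acc * 2 + (if c = '1' then 1 else 0)) acc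
      = acc * 2 ^ k + (2 ^ k - 1) := by
  induction k generalizing acc with
  | zero => simp
  | succ k ih =>
    rw [List.replicate_succ, List.foldl_cons, ih]
    norm_num
    ring

theorem intOfBin_neg (rest : List Char) : intOfBin ('-' :: rest) = - parseVal rest := rfl

theorem intOfBin_0b (rest : List Char) : intOfBin ('0' :: 'b' :: rest) = parseVal ('0' :: 'b' :: rest) := rfl

theorem parseVal_0b (rest : List Char) : parseVal ('0' :: 'b' :: rest) = foldBits rest := rfl

theorem find_eq_alt (a : Int) : find a = find_alt a := by
  by_cases h0 : a = 0
  · subst h0; decide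
  · by_cases hn : a < 0
    · have : pyBin a = '-' :: '0' :: 'b' :: binDigits a.natAbs := by
        simp [pyBin, h0, hn]
      rw [find]
      simp only [this, List.mapIdx_cons]
      rw [mapIdx_eq_map_of_const _ (fun c => if c = '0' then '1' else c)
        (by intro i c; simp)]
      rw [flip_binDigits]
      norm_num
      rw [if_neg (by decide : ¬ ('b' : Char) = '0')]
      rw [intOfBin_neg, parseVal_0b, foldBits, foldBits_ones]
      simp [find_alt, h0, hn]
    · have : pyBin a = '0' :: 'b' :: binDigits a.natAbs := by
        simp [pyBin, h0, hn]
      rw [find]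
      simp only [this, List.mapIdx_cons]
      rw [mapIdx_eq_map_of_const _ (fun c => if c = '0' then '1' else c)
        (by intro i c; simp)]
      rw [flip_binDigits]
      norm_num
      rw [intOfBin_0b, parseVal_0b, foldBits, foldBits_ones]
      simp [find_alt, h0, hn]

-- ===== VERDICT (by name: the statement is the Claim_ definition above) =====
theorem find_spec : Claim_equal_find := by
  intro a _
  unfold Spec_find
  exact find_eq_alt a
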